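-- pv_equiv track=rewrite | github.com/LiangLiang619/LiangLiangPrivateRepo | skills/pages/replace-shortpath-to-longpath/scripts/scan_longpath_usage.py | _compute_block_comment_mask
-- ===== SOURCE A (Python) =====
-- def _compute_block_comment_mask(lines):
--     """True = skip; line is inside a --[[ block from line start state."""
--     mask = [False] * len(lines)
--     in_block = False
--     for i, l in enumerate(lines):
--         mask[i] = in_block
--         j = 0
--         while j < len(l):
--             if not in_block and l[j : j + 4] == "--[[":
--                 in_block = True
--                 j += 4
--             elif in_block and l[j : j + 2] == "]]":
--                 in_block = False
--                 j += 2
--             else: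
--                 j += 1
--     return mask
-- ===== SOURCE B (Python) =====
-- def _compute_block_comment_mask(lines):
--     """True = skip; line is inside a --[[ block from line start state."""
--
--     def tokenize(l):
--         # stateless left-to-right scan: True = "--[[" opener, False = "]]" closer
--         toks = []
--         j, n = 0, len(l)
--         while j < n:
--             if l.startswith("--[[", j):
--                 toks.append(True)
--                 j += 4
--             elif l.startswith("]]", j):
--                 toks.append(False)
--                 j += 2
--             else:
--                 j += 1
--         return toks
--
--     def sweep(toks, state):
--         for opener in toks:
--             if opener:
--                 if not state:
--                     state = True
--             elif state:
--                 state = False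
--         return state
--
--     mask = []
--     state = False
--     for l in lines:
--         mask.append(state)
--         state = sweep(tokenize(l), state)
--     return mask
-- ===== Notes on version B (the rewrite author's own statement) =====
-- stated objective: alternative
-- what changed: Replaces A's single stateful per-character while-loop (state-dependent matching and skips) by a two-stage decomposition: a stateless tokenizer that extracts the ordered stream of '--[[' / ']]' markers per line, then a pure fold over that token stream toggling the in-block state, with the mask emitted as the running state per line.
import Mathlib
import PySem

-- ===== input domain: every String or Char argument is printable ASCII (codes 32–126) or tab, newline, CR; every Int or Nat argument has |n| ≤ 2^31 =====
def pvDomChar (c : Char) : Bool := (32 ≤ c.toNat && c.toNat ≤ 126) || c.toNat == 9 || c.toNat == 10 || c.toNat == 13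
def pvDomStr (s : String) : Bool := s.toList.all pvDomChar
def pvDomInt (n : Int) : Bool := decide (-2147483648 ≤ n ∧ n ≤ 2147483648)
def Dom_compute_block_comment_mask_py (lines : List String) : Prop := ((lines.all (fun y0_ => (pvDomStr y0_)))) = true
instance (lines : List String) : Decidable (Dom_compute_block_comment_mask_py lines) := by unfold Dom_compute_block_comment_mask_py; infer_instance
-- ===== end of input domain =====

-- B replaces A's single stateful per-character scan by a stateless tokenizer plus a pure
-- fold over the token stream (objective: alternative decomposition, same cost).

-- ===== PORT A =====
-- A's inner while loop over j: recursion on the char-list suffix; l[j:j+4] == "--[[" is take 4.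
def pvAScan (l : List Char) (b : Bool) : Bool :=
  match l with
  | [] => b
  | c :: rest =>
    if !b && (c :: rest).take 4 = ['-', '-', '[', '['] then
      pvAScan ((c :: rest).drop 4) true
    else if b && (c :: rest).take 2 = [']', ']'] then
      pvAScan ((c :: rest).drop 2) false
    else
      pvAScan rest b
termination_by l.length
decreasing_by all_goals simp

-- the for-loop over enumerate(lines): mask entries are written in index order
def compute_block_comment_mask_py (lines : List String) : List Bool :=
  (lines.foldl (fun (acc : List Bool × Bool) l =>
      (acc.1 ++ [acc.2], pvAScan l.toList acc.2)) ([], false)).1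

-- ===== PORT B =====
-- stateless tokenizer: true = "--[[" opener, false = "]]" closer
def pvTokenize (l : List Char) : List Bool :=
  match l with
  | [] => []
  | c :: rest =>
    if (c :: rest).take 4 = ['-', '-', '[', '['] then
      true :: pvTokenize ((c :: rest).drop 4)
    else if (c :: rest).take 2 = [']', ']'] then
      false :: pvTokenize ((c :: rest).drop 2)
    else
      pvTokenize rest
termination_by l.length
decreasing_by all_goals simp

def pvSweepStep (state : Bool) (opener : Bool) : Bool :=
  if opener then (if !state then true else state)
  else (if state then false else state)

def pvSweep (toks : List Bool) (state : Bool) : Bool :=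
  toks.foldl pvSweepStep state

def pvMaskB : List String → Bool → List Bool
  | [], _ => []
  | l :: rest, state => state :: pvMaskB rest (pvSweep (pvTokenize l.toList) state)

def compute_block_comment_mask_py_alt (lines : List String) : List Bool :=
  pvMaskB lines false

-- ===== PRECONDITION & SPEC =====
def Spec_compute_block_comment_mask_py (lines : List String) (out : List Bool) : Prop := out = compute_block_comment_mask_py_alt lines
instance (lines : List String) (out : List Bool) : Decidable (Spec_compute_block_comment_mask_py lines out) := by unfold Spec_compute_block_comment_mask_py; infer_instance

-- ===== CLAIM (what is proved, stated in full; the proofs are below) =====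
def Claim_equal_compute_block_comment_mask_py : Prop := ∀ (lines : List String), Dom_compute_block_comment_mask_py lines → Spec_compute_block_comment_mask_py lines (compute_block_comment_mask_py lines)

-- ===== LEMMAS AND PROOFS =====

-- A's stateful scan equals sweeping the stateless token stream
theorem pvAScan_eq_sweep (l : List Char) :
    ∀ b, pvAScan l b = pvSweep (pvTokenize l) b := by
  induction l using pvTokenize.induct with
  | case1 => intro b; simp [pvAScan, pvTokenize, pvSweep]
  | case2 c rest h ih =>
    intro b
    cases rest with
    | nil => simp at h
    | cons c2 r2 =>
      cases r2 with
      | nil => simp at h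
      | cons c3 r3 =>
        cases r3 with
        | nil => simp at h
        | cons c4 t =>
          simp at h
          obtain ⟨h1, h2, h3, h4⟩ := h
          subst h1; subst h2; subst h3; subst h4
          simp at ih
          cases b <;>
            simp [pvAScan, pvTokenize, pvSweep, pvSweepStep, ih]
  | case3 c rest h h2 ih =>
    intro b
    cases rest with
    | nil => simp at h2
    | cons c2 t =>
      simp at h2
      obtain ⟨h1, h1'⟩ := h2
      subst h1; subst h1'
      cases b <;>
        simp_all [pvAScan, pvTokenize, pvSweep, pvSweepStep]
  | case4 c rest h h2 ih =>
    intro b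
    have h4 : ¬(c = '-' ∧ List.take 3 rest = ['-', '[', '[']) := by
      intro hc; exact h (by simp [hc.1, hc.2])
    have h5 : ¬(c = ']' ∧ List.take 1 rest = [']']) := by
      intro hc; exact h2 (by simp [hc.1, hc.2])
    cases b with
    | false =>
      simp [pvAScan, pvTokenize, pvSweep]
      rw [if_neg h4, if_neg h4, if_neg h5]
      exact ih false
    | true =>
      simp [pvAScan, pvTokenize, pvSweep]
      rw [if_neg h5, if_neg h4, if_neg h5]
      exact ih true

theorem pvFold_eq_maskB (lines : List String) (acc : List Bool) (b : Bool) :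
    (lines.foldl (fun (acc : List Bool × Bool) l =>
      (acc.1 ++ [acc.2], pvAScan l.toList acc.2)) (acc, b)).1 = acc ++ pvMaskB lines b := by
  induction lines generalizing acc b with
  | nil => simp [pvMaskB]
  | cons l rest ih =>
    simp only [List.foldl_cons]
    rw [ih, pvAScan_eq_sweep, pvMaskB]
    simp

-- ===== VERDICT (by name: the statement is the Claim_ definition above) =====
theorem compute_block_comment_mask_py_spec : Claim_equal_compute_block_comment_mask_py := by
  intro lines _
  unfold Spec_compute_block_comment_mask_py compute_block_comment_mask_py compute_block_comment_mask_py_alt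
  simpa using pvFold_eq_maskB lines [] false
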